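-- pv_equiv track=rewrite | github.com/rt-uae-dev/new-new | src/structure_with_gpt.py | merge_structured_documents
-- ===== SOURCE A (Python) =====
-- def merge_structured_documents(structured_docs):
--     """
--     Combines all partial structured docs into a single folder-level structure.
--     structured_docs = [(dict, image_path), ...]
--     """
--     final = {
--         "Full Name": None,
--         "Full Name (AR)": None,
--         "Father's Name": None,
--         "Mother's Name": None,
--         "Date of Birth": None,
--         "Nationality": None,
--         "Nationality (AR)": None,
--         "Passport Number": None,
--         "EID_Number": None,
--         "Identity_Number": None,
--         "UID_Number": None,
--         "Place of Birth": None,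
--         "Place of Birth (AR)": None,
--         "Passport Issue Place": None,
--         "Passport Issue Place (AR)": None,
--         "Passport Issue Date": None,
--         "Passport Expiry Date": None,
--         "Home Phone Number": None,
--         "Home Address": None,
--         "UAE Address": None,
--         "Job Title": None,
--         "Salary": None,
--         "Document Type": None,
--         "Attestation Number 1": None,
--         "Attestation Number 2": None
--     }
--
--     for struct, _ in structured_docs:
--         for key in final:
--             if not final[key] and struct.get(key):
--                 final[key] = struct[key]
--
--     return final
-- ===== SOURCE B (Python) =====
-- _KEYS = [
--     "Full Name", "Full Name (AR)", "Father's Name", "Mother's Name",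
--     "Date of Birth", "Nationality", "Nationality (AR)", "Passport Number",
--     "EID_Number", "Identity_Number", "UID_Number", "Place of Birth",
--     "Place of Birth (AR)", "Passport Issue Place", "Passport Issue Place (AR)",
--     "Passport Issue Date", "Passport Expiry Date", "Home Phone Number",
--     "Home Address", "UAE Address", "Job Title", "Salary", "Document Type",
--     "Attestation Number 1", "Attestation Number 2",
-- ]
--
--
-- def merge_structured_documents(structured_docs):
--     """Back-to-front merge: fold the documents in REVERSE order with
--     unconditional last-write-wins overwrite of truthy values, so the first
--     document's truthy value for each key ends up on top.  No 'cell already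
--     filled' guard is needed."""
--     final = dict.fromkeys(_KEYS)
--     for struct, _ in reversed(list(structured_docs)):
--         for key in _KEYS:
--             v = struct.get(key)
--             if v:
--                 final[key] = v
--     return final
-- ===== Notes on version B (the rewrite author's own statement) =====
-- stated objective: alternative
-- what changed: B builds the result back-to-front: it folds the documents in reverse order with unconditional last-write-wins overwrite of truthy values, which makes A's 'cell already filled' guard on the shared accumulator unnecessary (first-wins becomes last-write of the reversed fold).
import Mathlib
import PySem

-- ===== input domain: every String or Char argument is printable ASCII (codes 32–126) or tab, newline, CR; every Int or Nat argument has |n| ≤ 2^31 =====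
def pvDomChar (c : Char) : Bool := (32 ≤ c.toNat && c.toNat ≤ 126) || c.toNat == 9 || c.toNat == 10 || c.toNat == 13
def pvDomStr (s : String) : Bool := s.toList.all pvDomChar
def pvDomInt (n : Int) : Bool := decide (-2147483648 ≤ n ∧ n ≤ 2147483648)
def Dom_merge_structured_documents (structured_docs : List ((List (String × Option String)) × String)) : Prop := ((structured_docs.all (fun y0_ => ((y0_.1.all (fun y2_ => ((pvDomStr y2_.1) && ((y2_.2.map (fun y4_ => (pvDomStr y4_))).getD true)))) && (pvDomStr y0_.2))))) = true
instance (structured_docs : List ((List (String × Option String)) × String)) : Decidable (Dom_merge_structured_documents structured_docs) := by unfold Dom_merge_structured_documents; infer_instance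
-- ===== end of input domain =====

-- B builds the result back-to-front: it folds the documents in REVERSE order with
-- unconditional last-write-wins overwrite of truthy values, so A's 'cell already
-- filled' guard on the shared accumulator disappears. Return value only: B
-- materialises list(structured_docs) before reversing. Objective: alternative.

-- Shared primitives of the Python semantics (truthiness of an Optional[str] value,
-- dict.get on an association list):
def pvTruthy : Option String → Bool
  | none => false
  | some s => !(s == "")

def pvGet (s : List (String × Option String)) (k : String) : Option (Option String) :=
  (PySem.Dict.mk s).get? k

-- struct.get(key) is truthy
def pvHit (s : List (String × Option String)) (k : String) : Bool :=
  match pvGet s k with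
  | some v => pvTruthy v
  | none => false

-- the 25 keys of A's `final` dict literal, in order (= Source B's _KEYS)
def pvKeys : List String :=
  ["Full Name", "Full Name (AR)", "Father's Name", "Mother's Name", "Date of Birth",
   "Nationality", "Nationality (AR)", "Passport Number", "EID_Number", "Identity_Number",
   "UID_Number", "Place of Birth", "Place of Birth (AR)", "Passport Issue Place",
   "Passport Issue Place (AR)", "Passport Issue Date", "Passport Expiry Date",
   "Home Phone Number", "Home Address", "UAE Address", "Job Title", "Salary",
   "Document Type", "Attestation Number 1", "Attestation Number 2"]

-- ===== PORT A =====
-- Literal port: build `final` as a dict of the 25 keys mapped to None, then for each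
-- (struct, _) and each key of `final`, overwrite when `not final[key] and struct.get(key)`.
def merge_structured_documents (structured_docs : List ((List (String × Option String)) × String)) : List (String × Option String) :=
  let final0 : PySem.Dict String (Option String) := PySem.Dict.mk (pvKeys.map (fun k => (k, none)))
  let final := structured_docs.foldl (fun final doc =>
    (PySem.Dict.keys final).foldl (fun f key =>
      if pvTruthy (f.getD key none) = false ∧ pvHit doc.1 key = true then
        f.insert key ((pvGet doc.1 key).getD none)
      else f) final) final0
  final.items

-- ===== PORT B =====
-- Literal port of Source B: seed `final` with the 25 keys mapped to None
-- (dict.fromkeys), then fold the documents in REVERSE order, unconditionally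
-- overwriting final[key] with v = struct.get(key) whenever v is truthy.
def merge_structured_documents_alt (structured_docs : List ((List (String × Option String)) × String)) : List (String × Option String) :=
  let final0 : PySem.Dict String (Option String) := PySem.Dict.mk (pvKeys.map (fun k => (k, none)))
  let final := structured_docs.reverse.foldl (fun f doc =>
    pvKeys.foldl (fun f key =>
      let v := (pvGet doc.1 key).getD none
      if pvTruthy v = true then f.insert key v else f) f) final0
  final.items

-- ===== PRECONDITION & SPEC =====
def Spec_merge_structured_documents (structured_docs : List ((List (String × Option String)) × String)) (out : List (String × Option String)) : Prop := out = merge_structured_documents_alt structured_docs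
instance (structured_docs : List ((List (String × Option String)) × String)) (out : List (String × Option String)) : Decidable (Spec_merge_structured_documents structured_docs out) := by unfold Spec_merge_structured_documents; infer_instance

-- ===== CLAIM (what is proved, stated in full; the proofs are below) =====
def Claim_equal_merge_structured_documents : Prop := ∀ (structured_docs : List ((List (String × Option String)) × String)), Dom_merge_structured_documents structured_docs → Spec_merge_structured_documents structured_docs (merge_structured_documents structured_docs)

-- ===== LEMMAS AND PROOFS =====

-- the common value both programs put in cell k: the first document (in order)
-- whose value for k is truthy, else None (proof-side only)
def pvFirst (ds : List (List (String × Option String))) (k : String) : Option String :=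
  match ds.find? (fun s => pvHit s k) with
  | some s => (pvGet s k).getD none
  | none => none

-- ---- A-side loop shapes ----
def pvStep (s : List (String × Option String)) (f : PySem.Dict String (Option String)) (key : String) : PySem.Dict String (Option String) :=
  if pvTruthy (f.getD key none) = false ∧ pvHit s key = true then
    f.insert key ((pvGet s key).getD none)
  else f

def pvInner (s : List (String × Option String)) (L : List String) (d : PySem.Dict String (Option String)) : PySem.Dict String (Option String) :=
  L.foldl (pvStep s) d

def pvOuter (docs : List ((List (String × Option String)) × String)) (d : PySem.Dict String (Option String)) : PySem.Dict String (Option String) :=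
  docs.foldl (fun final doc => pvInner doc.1 (PySem.Dict.keys final) final) d

lemma pvHit_truthy {s : List (String × Option String)} {k : String} (h : pvHit s k = true) :
    pvTruthy ((pvGet s k).getD none) = true := by
  unfold pvHit at h
  cases hg : pvGet s k with
  | none => simp [hg] at h
  | some v => simpa [hg] using h

lemma pvInner_cons (s : List (String × Option String)) (h : String) (t : List String)
    (d : PySem.Dict String (Option String)) :
    pvInner s (h :: t) d = pvInner s t (pvStep s d h) := rfl

lemma pvStep_pos {s : List (String × Option String)} {d : PySem.Dict String (Option String)}
    {key : String} (hc : pvTruthy (d.getD key none) = false ∧ pvHit s key = true) :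
    pvStep s d key = d.insert key ((pvGet s key).getD none) := by
  unfold pvStep; exact if_pos hc

lemma pvStep_neg {s : List (String × Option String)} {d : PySem.Dict String (Option String)}
    {key : String} (hc : ¬ (pvTruthy (d.getD key none) = false ∧ pvHit s key = true)) :
    pvStep s d key = d := by
  unfold pvStep; exact if_neg hc

lemma keys_pvInner (s : List (String × Option String)) (L : List String)
    (d : PySem.Dict String (Option String)) (hL : ∀ k ∈ L, d.contains k = true) :
    (pvInner s L d).keys = d.keys := by
  induction L generalizing d with
  | nil => rfl
  | cons h t ih =>
    have hh := hL h (by simp)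
    have ht : ∀ k ∈ t, d.contains k = true := fun k hk => hL k (by simp [hk])
    rw [pvInner_cons]
    by_cases hc : pvTruthy (d.getD h none) = false ∧ pvHit s h = true
    · rw [pvStep_pos hc,
        ih _ (fun k hk => by simp [PySem.Dict.contains_insert, ht k hk])]
      exact PySem.Dict.keys_insert_of_contains _ _ hh
    · rw [pvStep_neg hc]; exact ih d ht

lemma getD_pvInner_notmem (s : List (String × Option String)) (L : List String)
    (d : PySem.Dict String (Option String)) (k : String) (hk : k ∉ L) :
    (pvInner s L d).getD k none = d.getD k none := by
  induction L generalizing d with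
  | nil => rfl
  | cons h t ih =>
    have hne : k ≠ h := fun e => hk (by simp [e])
    rw [pvInner_cons]
    by_cases hc : pvTruthy (d.getD h none) = false ∧ pvHit s h = true
    · rw [pvStep_pos hc, ih _ (fun m => hk (by simp [m])),
        PySem.Dict.getD_insert_of_ne _ _ _ hne]
    · rw [pvStep_neg hc]; exact ih d (fun m => hk (by simp [m]))

lemma getD_pvInner (s : List (String × Option String)) (L : List String) (hnd : L.Nodup)
    (d : PySem.Dict String (Option String)) (k : String) :
    (pvInner s L d).getD k none =
      if k ∈ L ∧ pvTruthy (d.getD k none) = false ∧ pvHit s k = true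
      then (pvGet s k).getD none else d.getD k none := by
  induction L generalizing d with
  | nil => simp [pvInner]
  | cons h t ih =>
    rcases List.nodup_cons.mp hnd with ⟨hht, hndt⟩
    rw [pvInner_cons]
    by_cases hk : k = h
    · subst hk
      by_cases hc : pvTruthy (d.getD k none) = false ∧ pvHit s k = true
      · rw [pvStep_pos hc, getD_pvInner_notmem _ _ _ _ hht, PySem.Dict.getD_insert_self]
        simp [hc.1, hc.2]
      · rw [pvStep_neg hc, ih hndt d]
        have h1 : ¬ (k ∈ t ∧ pvTruthy (d.getD k none) = false ∧ pvHit s k = true) := by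
          intro ⟨_, h2⟩; exact hc h2
        have h2 : ¬ (k ∈ k :: t ∧ pvTruthy (d.getD k none) = false ∧ pvHit s k = true) := by
          intro ⟨_, h2⟩; exact hc h2
        rw [if_neg h1, if_neg h2]
    · have hmem : k ∈ h :: t ↔ k ∈ t := by simp [hk]
      by_cases hc : pvTruthy (d.getD h none) = false ∧ pvHit s h = true
      · rw [pvStep_pos hc, ih hndt _, PySem.Dict.getD_insert_of_ne _ _ _ hk]
        simp [hmem]
      · rw [pvStep_neg hc, ih hndt d]; simp [hmem]

lemma pvKeys_nodup : pvKeys.Nodup := by decide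

lemma keys_pvOuter (docs : List ((List (String × Option String)) × String))
    (d : PySem.Dict String (Option String)) :
    (pvOuter docs d).keys = d.keys := by
  induction docs generalizing d with
  | nil => rfl
  | cons doc rest ih =>
    unfold pvOuter at *
    simp only [List.foldl_cons]
    rw [ih]
    exact keys_pvInner _ _ _ (fun k hk => (PySem.Dict.contains_iff_mem_keys _ _).mpr hk)

lemma getD_pvOuter (docs : List ((List (String × Option String)) × String))
    (d : PySem.Dict String (Option String)) (hkeys : d.keys = pvKeys) (k : String)
    (hk : k ∈ pvKeys)
    (hv : d.getD k none = none ∨ pvTruthy (d.getD k none) = true) :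
    (pvOuter docs d).getD k none =
      if pvTruthy (d.getD k none) = true then d.getD k none
      else pvFirst (docs.map (fun p => p.1)) k := by
  induction docs generalizing d with
  | nil =>
    rcases hv with h | h
    · simp [pvOuter, h, pvTruthy, pvFirst]
    · simp [pvOuter, h]
  | cons doc rest ih =>
    unfold pvOuter at *
    simp only [List.foldl_cons]
    set d' := pvInner doc.1 (PySem.Dict.keys d) d with hd'
    have hgd' : d'.getD k none =
        if k ∈ pvKeys ∧ pvTruthy (d.getD k none) = false ∧ pvHit doc.1 k = true
        then (pvGet doc.1 k).getD none else d.getD k none := by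
      rw [hd', hkeys]; exact getD_pvInner _ _ pvKeys_nodup d k
    have hkeys' : d'.keys = pvKeys := by
      rw [hd', hkeys,
        keys_pvInner doc.1 pvKeys d
          (fun m hm => (PySem.Dict.contains_iff_mem_keys _ _).mpr (by rw [hkeys]; exact hm))]
      exact hkeys
    by_cases ht : pvTruthy (d.getD k none) = true
    · have hgd'2 : d'.getD k none = d.getD k none := by simp [hgd', ht]
      rw [ih d' hkeys' (by rw [hgd'2]; exact hv), hgd'2]
      simp [ht]
    · have htf : pvTruthy (d.getD k none) = false := by
        cases hx : pvTruthy (d.getD k none) <;> simp_all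
      by_cases hh : pvHit doc.1 k = true
      · have hgd'2 : d'.getD k none = (pvGet doc.1 k).getD none := by
          simp [hgd', hk, htf, hh]
        have ht' : pvTruthy (d'.getD k none) = true := hgd'2 ▸ pvHit_truthy hh
        rw [ih d' hkeys' (Or.inr ht'), if_pos ht', if_neg ht, hgd'2]
        simp [pvFirst, hh]
      · have hhf : pvHit doc.1 k = false := by
          cases hx : pvHit doc.1 k <;> simp_all
        have hgd'2 : d'.getD k none = d.getD k none := by simp [hgd', hhf]
        rw [ih d' hkeys' (by rw [hgd'2]; exact hv), hgd'2, if_neg ht, if_neg ht]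
        simp [pvFirst, hhf]

lemma getD_final0 (k : String) :
    (PySem.Dict.mk (pvKeys.map (fun k => (k, (none : Option String))))).getD k none = none := by
  have : ∀ (L : List String),
      (PySem.Dict.mk (L.map (fun k => (k, (none : Option String))))).getD k none = none := by
    intro L
    induction L with
    | nil => rfl
    | cons h t ih =>
      simp only [List.map_cons]
      rw [PySem.Dict.getD_eq_get?_getD, PySem.Dict.get?_mk_cons]
      split
      · rfl
      · rw [← PySem.Dict.getD_eq_get?_getD, ih]
  exact this pvKeys

lemma keys_final0 :
    (PySem.Dict.mk (pvKeys.map (fun k => (k, (none : Option String))))).keys = pvKeys := by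
  decide

-- A's result, characterised cell by cell
lemma A_eq_map (docs : List ((List (String × Option String)) × String)) :
    merge_structured_documents docs =
      pvKeys.map (fun k => (k, pvFirst (docs.map (fun p => p.1)) k)) := by
  unfold merge_structured_documents
  simp only []
  set final0 : PySem.Dict String (Option String) :=
    PySem.Dict.mk (pvKeys.map (fun k => (k, none))) with hf0
  have houter : docs.foldl (fun final doc =>
      (PySem.Dict.keys final).foldl (fun f key =>
        if pvTruthy (f.getD key none) = false ∧ pvHit doc.1 key = true then
          f.insert key ((pvGet doc.1 key).getD none)
        else f) final) final0 = pvOuter docs final0 := rfl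
  rw [houter]
  have h0keys : final0.keys = pvKeys := by rw [hf0]; exact keys_final0
  have h0getD : ∀ k, final0.getD k none = none := fun k => by rw [hf0]; exact getD_final0 k
  have hkeys : (pvOuter docs final0).keys = pvKeys := by rw [keys_pvOuter]; exact h0keys
  have hnd : (pvOuter docs final0).keys.Nodup := hkeys ▸ pvKeys_nodup
  rw [PySem.Dict.items_eq_map_keys _ hnd none, hkeys]
  apply List.map_congr_left
  intro k hk
  rw [getD_pvOuter docs final0 h0keys k hk (Or.inl (h0getD k)), h0getD k]
  simp [pvTruthy]

-- ---- B-side loop shapes ----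
def pvStepB (s : List (String × Option String)) (f : PySem.Dict String (Option String)) (key : String) : PySem.Dict String (Option String) :=
  let v := (pvGet s key).getD none
  if pvTruthy v = true then f.insert key v else f

def pvInnerB (s : List (String × Option String)) (L : List String) (d : PySem.Dict String (Option String)) : PySem.Dict String (Option String) :=
  L.foldl (pvStepB s) d

def pvOuterB (docs : List ((List (String × Option String)) × String)) (d : PySem.Dict String (Option String)) : PySem.Dict String (Option String) :=
  docs.foldl (fun f doc => pvInnerB doc.1 pvKeys f) d

-- Source B's guard `if v:` is exactly pvHit
lemma pvStepB_eq (s : List (String × Option String)) (f : PySem.Dict String (Option String)) (key : String) :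
    pvStepB s f key =
      if pvHit s key = true then f.insert key ((pvGet s key).getD none) else f := by
  unfold pvStepB pvHit
  cases hg : pvGet s key with
  | none => simp [pvTruthy]
  | some v => simp

lemma keys_pvInnerB (s : List (String × Option String)) (L : List String)
    (d : PySem.Dict String (Option String)) (hL : ∀ k ∈ L, d.contains k = true) :
    (pvInnerB s L d).keys = d.keys := by
  induction L generalizing d with
  | nil => rfl
  | cons h t ih =>
    have hh := hL h (by simp)
    have ht : ∀ k ∈ t, d.contains k = true := fun k hk => hL k (by simp [hk])
    show (pvInnerB s t (pvStepB s d h)).keys = d.keys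
    rw [pvStepB_eq]
    by_cases hc : pvHit s h = true
    · rw [if_pos hc,
        ih _ (fun k hk => by simp [PySem.Dict.contains_insert, ht k hk])]
      exact PySem.Dict.keys_insert_of_contains _ _ hh
    · rw [if_neg hc]; exact ih d ht

lemma getD_pvInnerB_notmem (s : List (String × Option String)) (L : List String)
    (d : PySem.Dict String (Option String)) (k : String) (hk : k ∉ L) :
    (pvInnerB s L d).getD k none = d.getD k none := by
  induction L generalizing d with
  | nil => rfl
  | cons h t ih =>
    have hne : k ≠ h := fun e => hk (by simp [e])
    show (pvInnerB s t (pvStepB s d h)).getD k none = d.getD k none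
    rw [pvStepB_eq]
    by_cases hc : pvHit s h = true
    · rw [if_pos hc, ih _ (fun m => hk (by simp [m])),
        PySem.Dict.getD_insert_of_ne _ _ _ hne]
    · rw [if_neg hc]; exact ih d (fun m => hk (by simp [m]))

lemma getD_pvInnerB (s : List (String × Option String)) (L : List String) (hnd : L.Nodup)
    (d : PySem.Dict String (Option String)) (k : String) :
    (pvInnerB s L d).getD k none =
      if k ∈ L ∧ pvHit s k = true then (pvGet s k).getD none else d.getD k none := by
  induction L generalizing d with
  | nil => simp [pvInnerB]
  | cons h t ih =>
    rcases List.nodup_cons.mp hnd with ⟨hht, hndt⟩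
    show (pvInnerB s t (pvStepB s d h)).getD k none = _
    rw [pvStepB_eq]
    by_cases hk : k = h
    · subst hk
      by_cases hc : pvHit s k = true
      · rw [if_pos hc, getD_pvInnerB_notmem _ _ _ _ hht, PySem.Dict.getD_insert_self]
        simp [hc]
      · rw [if_neg hc, ih hndt d]
        simp [hc]
    · have hmem : k ∈ h :: t ↔ k ∈ t := by simp [hk]
      by_cases hc : pvHit s h = true
      · rw [if_pos hc, ih hndt _, PySem.Dict.getD_insert_of_ne _ _ _ hk]
        simp [hmem]
      · rw [if_neg hc, ih hndt d]; simp [hmem]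

lemma keys_pvOuterB (docs : List ((List (String × Option String)) × String))
    (d : PySem.Dict String (Option String)) (hkeys : d.keys = pvKeys) :
    (pvOuterB docs d).keys = pvKeys := by
  induction docs generalizing d with
  | nil => exact hkeys
  | cons doc rest ih =>
    unfold pvOuterB at *
    simp only [List.foldl_cons]
    apply ih
    rw [keys_pvInnerB doc.1 pvKeys d
      (fun m hm => (PySem.Dict.contains_iff_mem_keys _ _).mpr (by rw [hkeys]; exact hm))]
    exact hkeys

-- in B's fold, the LAST truthy document of the folded list wins for each key
lemma getD_pvOuterB (docs : List ((List (String × Option String)) × String))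
    (d : PySem.Dict String (Option String)) (hkeys : d.keys = pvKeys) (k : String)
    (hk : k ∈ pvKeys) :
    (pvOuterB docs d).getD k none =
      match docs.reverse.find? (fun doc => pvHit doc.1 k) with
      | some doc => (pvGet doc.1 k).getD none
      | none => d.getD k none := by
  induction docs generalizing d with
  | nil => simp [pvOuterB]
  | cons doc rest ih =>
    unfold pvOuterB at *
    simp only [List.foldl_cons, List.reverse_cons]
    have hkeys' : (pvInnerB doc.1 pvKeys d).keys = pvKeys := by
      rw [keys_pvInnerB doc.1 pvKeys d
        (fun m hm => (PySem.Dict.contains_iff_mem_keys _ _).mpr (by rw [hkeys]; exact hm))]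
      exact hkeys
    rw [ih _ hkeys', List.find?_append]
    cases hr : rest.reverse.find? (fun doc => pvHit doc.1 k) with
    | some s => simp
    | none =>
      simp only [Option.none_or]
      rw [getD_pvInnerB doc.1 pvKeys pvKeys_nodup d k]
      by_cases hh : pvHit doc.1 k = true
      · simp [hk, hh, List.find?]
      · simp [hh, List.find?]

-- B's result, characterised cell by cell
lemma B_eq_map (docs : List ((List (String × Option String)) × String)) :
    merge_structured_documents_alt docs =
      pvKeys.map (fun k => (k, pvFirst (docs.map (fun p => p.1)) k)) := by
  unfold merge_structured_documents_alt
  simp only []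
  set final0 : PySem.Dict String (Option String) :=
    PySem.Dict.mk (pvKeys.map (fun k => (k, none))) with hf0
  have houter : docs.reverse.foldl (fun f doc =>
      pvKeys.foldl (fun f key =>
        let v := (pvGet doc.1 key).getD none
        if pvTruthy v = true then f.insert key v else f) f) final0
      = pvOuterB docs.reverse final0 := rfl
  rw [houter]
  have h0keys : final0.keys = pvKeys := by rw [hf0]; exact keys_final0
  have hkeys : (pvOuterB docs.reverse final0).keys = pvKeys := keys_pvOuterB _ _ h0keys
  have hnd : (pvOuterB docs.reverse final0).keys.Nodup := hkeys ▸ pvKeys_nodup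
  rw [PySem.Dict.items_eq_map_keys _ hnd none, hkeys]
  apply List.map_congr_left
  intro k hk
  rw [getD_pvOuterB docs.reverse final0 h0keys k hk, List.reverse_reverse]
  unfold pvFirst
  rw [List.find?_map]
  have hpred : ((fun s => pvHit s k) ∘ fun p : (List (String × Option String) × String) => p.1)
      = (fun doc => pvHit doc.1 k) := rfl
  rw [hpred]
  cases hfind : docs.find? (fun doc => pvHit doc.1 k) with
  | some doc => simp
  | none =>
    simp only [Option.map_none]
    rw [hf0]; exact Prod.ext rfl (getD_final0 k)

-- ===== VERDICT (by name: the statement is the Claim_ definition above) =====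
theorem merge_structured_documents_spec : Claim_equal_merge_structured_documents := by
  intro docs _
  unfold Spec_merge_structured_documents
  rw [A_eq_map, B_eq_map]
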